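-- pv_equiv track=rewrite | github.com/alex1yaremchuk/nand-fpga | tools/render_screen_dump.py | preview_ascii
-- ===== SOURCE A (Python) =====
-- def preview_ascii(data: dict[int, int], words_per_row: int, rows: int, max_rows: int) -> str:
--     lines: list[str] = []
--     shown = min(rows, max_rows)
--     for y in range(shown):
--         base = y * words_per_row
--         chars: list[str] = []
--         for w in range(words_per_row):
--             word = data.get(base + w, 0)
--             for b in range(16):
--                 chars.append("#" if ((word >> b) & 1) else ".")
--         lines.append("".join(chars))
--     return "\n".join(lines)
-- ===== SOURCE B (Python) =====
-- def preview_ascii(data: dict[int, int], words_per_row: int, rows: int, max_rows: int) -> str: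
--     table = str.maketrans('01', '.#')
--     lines: list[str] = []
--     for y in range(min(rows, max_rows)):
--         base = y * words_per_row
--         lines.append(''.join(
--             format(data.get(base + w, 0) % 0x10000, '016b')[::-1].translate(table)
--             for w in range(words_per_row)))
--     return '\n'.join(lines)
-- ===== Notes on version B (the rewrite author's own statement) =====
-- stated objective: idiomatic
-- what changed: The per-bit shift-and-test inner loop is replaced by one binary-format conversion per word (format(word % 0x10000, '016b'), reversed to LSB-first) translated '0'/'1' to '.'/'#' via a str.maketrans table, and lines are built by join over generator comprehensions instead of appending to a char list.
import Mathlib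
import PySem

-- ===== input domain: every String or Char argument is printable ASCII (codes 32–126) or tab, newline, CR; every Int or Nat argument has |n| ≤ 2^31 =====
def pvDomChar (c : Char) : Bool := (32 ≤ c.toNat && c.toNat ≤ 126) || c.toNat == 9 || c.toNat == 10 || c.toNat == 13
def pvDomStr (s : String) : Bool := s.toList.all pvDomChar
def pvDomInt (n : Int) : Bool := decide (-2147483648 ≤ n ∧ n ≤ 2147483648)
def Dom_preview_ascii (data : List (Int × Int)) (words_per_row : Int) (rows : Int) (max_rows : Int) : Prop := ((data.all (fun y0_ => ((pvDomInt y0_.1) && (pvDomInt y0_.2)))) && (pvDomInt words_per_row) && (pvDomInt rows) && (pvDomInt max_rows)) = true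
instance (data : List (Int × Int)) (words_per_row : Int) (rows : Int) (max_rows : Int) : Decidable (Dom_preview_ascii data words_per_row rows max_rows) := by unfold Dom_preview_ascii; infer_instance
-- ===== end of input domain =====

-- B replaces A's per-bit shift-and-test inner loop with one binary-format conversion
-- (16 LSB-first digits of word % 0x10000) translated '0'/'1' → '.'/'#'; objective: idiomatic.

-- ===== PORT A =====
def preview_ascii (data : List (Int × Int)) (words_per_row : Int) (rows : Int) (max_rows : Int) : String :=
  let d := PySem.Dict.ofList data
  let shown := min rows max_rows
  let lines := (PySem.List.pyRange 0 shown 1).foldl (fun lines y =>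
    let base := y * words_per_row
    let chars := (PySem.List.pyRange 0 words_per_row 1).foldl (fun chars w =>
      let word := d.getD (base + w) 0
      (PySem.List.pyRange 0 16 1).foldl (fun chars b =>
        chars ++ [if PySem.Int.band (word >>> b.toNat) 1 ≠ 0 then '#' else '.']) chars) []
    lines ++ [String.ofList chars]) []
  PySem.Str.join "\n" lines

-- ===== PORT B =====
-- format(n, '016b') for 0 ≤ n < 2^16, ported by hand (exact there): 16 binary digits MSB first.
def pvLsbDigits : Nat → Nat → List Char
  | 0, _ => []
  | k + 1, n => (if n % 2 = 1 then '1' else '0') :: pvLsbDigits k (n / 2)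

def pvFormat016b (n : Nat) : List Char := (pvLsbDigits 16 n).reverse

-- str.maketrans('01', '.#') applied per character
def pvTr (c : Char) : Char := if c = '0' then '.' else if c = '1' then '#' else c

def preview_ascii_alt (data : List (Int × Int)) (words_per_row : Int) (rows : Int) (max_rows : Int) : String :=
  let d := PySem.Dict.ofList data
  let lines := (PySem.List.pyRange 0 (min rows max_rows) 1).map (fun y =>
    let base := y * words_per_row
    String.ofList (((PySem.List.pyRange 0 words_per_row 1).map (fun w =>
      (pvFormat016b (PySem.Int.mod (d.getD (base + w) 0) 65536).toNat).reverse.map pvTr)).flatten))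
  PySem.Str.join "\n" lines

-- ===== PRECONDITION & SPEC =====
def Spec_preview_ascii (data : List (Int × Int)) (words_per_row : Int) (rows : Int) (max_rows : Int) (out : String) : Prop := out = preview_ascii_alt data words_per_row rows max_rows
instance (data : List (Int × Int)) (words_per_row : Int) (rows : Int) (max_rows : Int) (out : String) : Decidable (Spec_preview_ascii data words_per_row rows max_rows out) := by unfold Spec_preview_ascii; infer_instance

-- ===== CLAIM (what is proved, stated in full; the proofs are below) =====
def Claim_equal_preview_ascii : Prop := ∀ (data : List (Int × Int)) (words_per_row : Int) (rows : Int) (max_rows : Int), Dom_preview_ascii data words_per_row rows max_rows → Spec_preview_ascii data words_per_row rows max_rows (preview_ascii data words_per_row rows max_rows)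

-- ===== LEMMAS AND PROOFS =====

-- generic loop shape: append-accumulating foldl is flatMap
theorem pv_foldl_app {α β : Type} (l : List α) (g : α → List β) (acc : List β) :
    l.foldl (fun a x => a ++ g x) acc = acc ++ l.flatMap g := by
  induction l generalizing acc with
  | nil => simp
  | cons x xs ih => simp [List.foldl_cons, ih]

theorem pv_flatMap_singleton {α β : Type} (l : List α) (f : α → β) :
    l.flatMap (fun x => [f x]) = l.map f := by
  induction l with
  | nil => rfl
  | cons x xs ih => simp [ih]

-- the digits of n are n / 2^b % 2, LSB first
theorem pvLsbDigits_eq_map (k : Nat) : ∀ n : Nat,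
    pvLsbDigits k n = (List.range k).map (fun b => if n / 2 ^ b % 2 = 1 then '1' else '0') := by
  induction k with
  | zero => intro n; rfl
  | succ k ih =>
      intro n
      rw [List.range_succ_eq_map]
      simp [pvLsbDigits, ih (n / 2), Nat.div_div_eq_div_mul, pow_succ, Nat.mul_comm]

-- Int bit b of word agrees with bit b of word % 2^16 for b < 16
theorem pv_bit_eq (word : Int) (b : Nat) (hb : b < 16) :
    word / 2 ^ b % 2 = word % 65536 / 2 ^ b % 2 := by
  interval_cases b <;> norm_num <;> omega

-- one 16-char chunk: A's bit loop equals B's format/translate chunk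
theorem pv_chunk_eq (word : Int) (cs : List Char) :
    (PySem.List.pyRange 0 16 1).foldl (fun chars b =>
        chars ++ [if PySem.Int.band (word >>> b.toNat) 1 ≠ 0 then '#' else '.']) cs
      = cs ++ (pvFormat016b (PySem.Int.mod word 65536).toNat).reverse.map pvTr := by
  have hmod : PySem.Int.mod word 65536 = word % 65536 := by simp [pysem]
  have hchar : ∀ b : Nat, b < 16 →
      (if PySem.Int.band (word >>> b) 1 ≠ 0 then '#' else '.')
        = pvTr (if (PySem.Int.mod word 65536).toNat / 2 ^ b % 2 = 1 then '1' else '0') := by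
    intro b hb
    have h1 : PySem.Int.band (word >>> b) 1 = (word >>> b) % 2 := by
      rw [PySem.Int.band_one]; simp [pysem]
    have hsh : word >>> b = word / 2 ^ b := Int.shiftRight_eq_div_pow word b
    have hr : 0 ≤ word % 65536 := Int.emod_nonneg word (by norm_num)
    have hcast : ((PySem.Int.mod word 65536).toNat : Int) = word % 65536 := by
      rw [hmod]; exact Int.toNat_of_nonneg hr
    have hbit := pv_bit_eq word b hb
    have hnat : ((PySem.Int.mod word 65536).toNat / 2 ^ b % 2 : Nat) = 1 ↔ word / 2 ^ b % 2 = 1 := by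
      have hc2 : (((PySem.Int.mod word 65536).toNat / 2 ^ b % 2 : Nat) : Int)
          = word % 65536 / 2 ^ b % 2 := by push_cast [hcast]; rfl
      omega
    rw [h1, hsh]
    by_cases hc : word / 2 ^ b % 2 = 1
    · rw [if_pos (by omega), if_pos (hnat.mpr hc)]; rfl
    · have h0 : word / 2 ^ b % 2 = 0 := by omega
      rw [if_neg (by omega), if_neg (by intro h; exact hc (hnat.mp h))]; rfl
  rw [pv_foldl_app]
  congr 1
  rw [pvFormat016b, List.reverse_reverse, pvLsbDigits_eq_map, PySem.List.pyRange_one,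
    pv_flatMap_singleton, List.map_map, List.map_map]
  norm_num
  refine List.map_congr_left ?_
  intro k hk
  have hk16 : k < 16 := by simpa using hk
  have : ((0 : Int) + (k : Int)).toNat = k := by omega
  simpa [this, Int.shiftRight_natCast_right] using hchar k hk16

-- the words loop of one row: A's nested fold equals B's map-and-flatten
theorem pv_words_eq (l : List Int) (f : Int → Int) (cs : List Char) :
    l.foldl (fun chars w =>
        (PySem.List.pyRange 0 16 1).foldl (fun chars b =>
          chars ++ [if PySem.Int.band (f w >>> b.toNat) 1 ≠ 0 then '#' else '.']) chars) cs
      = cs ++ (l.map (fun w => (pvFormat016b (PySem.Int.mod (f w) 65536).toNat).reverse.map pvTr)).flatten := by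
  induction l generalizing cs with
  | nil => simp
  | cons x xs ih => rw [List.foldl_cons, pv_chunk_eq, ih]; simp

-- ===== VERDICT (by name: the statement is the Claim_ definition above) =====
theorem preview_ascii_spec : Claim_equal_preview_ascii := by
  intro data wpr rows max_rows _
  show preview_ascii data wpr rows max_rows = preview_ascii_alt data wpr rows max_rows
  unfold preview_ascii preview_ascii_alt
  simp only [pv_words_eq]
  simp only [pv_foldl_app, pv_flatMap_singleton, List.nil_append]
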